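-- pv_equiv track=rewrite | github.com/bgabrovsek/knotpy | knotpy/invariants/homflypt.py | _min_len_item
-- ===== SOURCE A (Python) =====
-- def _min_len_item(f: list):
--     if not f:
--         raise ValueError("Cannot find minimum length item in empty list")
--     min_len = min(len(_) for _ in f)
--     for _ in f:
--         if len(_) == min_len:
--             return _
--     return None
-- ===== SOURCE B (Python) =====
-- def _min_len_item(f: list):
--     if not f:
--         raise ValueError("Cannot find minimum length item in empty list")
--     best = f[0]
--     for x in f:
--         if len(x) < len(best):
--             best = x
--     return best
-- ===== Notes on version B (the rewrite author's own statement) =====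
-- stated objective: simpler
-- what changed: Replaces A's two passes (compute the minimum length, then rescan for the first item of that length) with a single running-minimum pass using strict < so the first shortest item still wins.
import Mathlib
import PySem

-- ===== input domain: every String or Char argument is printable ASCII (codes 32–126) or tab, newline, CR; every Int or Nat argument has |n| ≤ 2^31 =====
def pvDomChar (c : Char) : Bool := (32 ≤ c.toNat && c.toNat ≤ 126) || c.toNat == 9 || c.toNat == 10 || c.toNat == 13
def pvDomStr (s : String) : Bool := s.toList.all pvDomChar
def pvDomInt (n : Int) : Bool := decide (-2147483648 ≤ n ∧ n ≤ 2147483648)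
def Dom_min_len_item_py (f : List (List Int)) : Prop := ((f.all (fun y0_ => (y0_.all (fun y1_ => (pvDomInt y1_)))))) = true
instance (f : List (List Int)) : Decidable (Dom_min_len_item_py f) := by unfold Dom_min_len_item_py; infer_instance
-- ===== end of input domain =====

-- B replaces A's two passes (min of lengths, then rescan) with one running-minimum pass; objective: simpler.

-- ===== PORT A =====
-- A: raise on empty (excluded by Pre_); min_len = min(len(_) for _ in f); return first item of that length.
def min_len_item_py (f : List (List Int)) : List Int :=
  if f = [] then []  -- Python raises ValueError here; excluded by Pre_
  else
    match (f.map (fun x => x.length)).min? with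
    | some m => (f.find? (fun x => x.length == m)).getD []  -- getD [] stands for the unreachable 'return None'
    | none => []

-- ===== PORT B =====
def min_len_item_py_alt (f : List (List Int)) : List Int :=
  match f with
  | [] => []  -- Python raises ValueError here; excluded by Pre_
  | h :: _ => f.foldl (fun best x => if x.length < best.length then x else best) h

-- ===== PRECONDITION & SPEC =====
-- A raises ValueError on the empty list; Pre_ excludes exactly that input.
def Pre_min_len_item_py (f : List (List Int)) : Prop := f ≠ []
instance (f : List (List Int)) : Decidable (Pre_min_len_item_py f) := by unfold Pre_min_len_item_py; infer_instance
def pvWitness_min_len_item_py : List (List Int) := [[1, 2], [3]]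

def Spec_min_len_item_py (f : List (List Int)) (out : List Int) : Prop := out = min_len_item_py_alt f
instance (f : List (List Int)) (out : List Int) : Decidable (Spec_min_len_item_py f out) := by unfold Spec_min_len_item_py; infer_instance

-- ===== CLAIM (what is proved, stated in full; the proofs are below) =====
def Claim_equal_min_len_item_py : Prop := ∀ (f : List (List Int)), Dom_min_len_item_py f → Pre_min_len_item_py f → Spec_min_len_item_py f (min_len_item_py f)

-- ===== LEMMAS AND PROOFS =====

-- running minimum of the lengths of l, started at b
def pvRunMin (l : List (List Int)) (b : Nat) : Nat :=
  l.foldl (fun acc x => Nat.min acc x.length) b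

theorem pvRunMin_le (l : List (List Int)) (b : Nat) : pvRunMin l b ≤ b := by
  induction l generalizing b with
  | nil => simp [pvRunMin]
  | cons x t ih =>
      have := ih (Nat.min b x.length)
      simpa [pvRunMin] using this.trans (Nat.min_le_left _ _)

theorem pv_fold_eq_find (l : List (List Int)) : ∀ b : List Int,
    l.foldl (fun best x => if x.length < best.length then x else best) b
      = ((b :: l).find? (fun x => x.length == pvRunMin l b.length)).getD [] := by
  induction l with
  | nil => intro b; simp [pvRunMin]
  | cons x t ih =>
      intro b
      by_cases hx : x.length < b.length
      · have hmm : pvRunMin (x :: t) b.length = pvRunMin t x.length := by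
          simp [pvRunMin, Nat.min_eq_right (Nat.le_of_lt hx)]
        have hskip : ¬ ((fun y : List Int => y.length == pvRunMin t x.length) b = true) := by
          have := pvRunMin_le t x.length
          simp; omega
        rw [List.foldl_cons]
        simp only [if_pos hx]
        rw [ih x, hmm, List.find?_cons_of_neg (p := fun y : List Int => y.length == pvRunMin t x.length) (a := b) hskip]
      · have hmm : pvRunMin (x :: t) b.length = pvRunMin t b.length := by
          simp [pvRunMin, Nat.min_eq_left (Nat.le_of_not_lt hx)]
        rw [List.foldl_cons]
        simp only [if_neg hx]
        rw [ih b, hmm]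
        by_cases hbm : b.length = pvRunMin t b.length
        · rw [List.find?_cons_of_pos (p := fun y : List Int => y.length == pvRunMin t b.length) (a := b) (by simpa using hbm),
              List.find?_cons_of_pos (p := fun y : List Int => y.length == pvRunMin t b.length) (a := b) (by simpa using hbm)]
        · have hxm : ¬ ((fun y : List Int => y.length == pvRunMin t b.length) x = true) := by
            have h1 := pvRunMin_le t b.length
            have h2 := Nat.le_of_not_lt hx
            simp; omega
          rw [List.find?_cons_of_neg (p := fun y : List Int => y.length == pvRunMin t b.length) (a := b) (by simpa using hbm),
              List.find?_cons_of_neg (p := fun y : List Int => y.length == pvRunMin t b.length) (a := b) (by simpa using hbm),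
              List.find?_cons_of_neg (p := fun y : List Int => y.length == pvRunMin t b.length) (a := x) hxm]

-- ===== VERDICT (by name: the statement is the Claim_ definition above) =====
theorem min_len_item_py_spec : Claim_equal_min_len_item_py := by
  intro f _ hpre
  unfold Spec_min_len_item_py
  match f with
  | [] => exact absurd rfl hpre
  | h :: t =>
      have hmin : ((h :: t).map (fun x => x.length)).min? = some (pvRunMin t h.length) := by
        simp [List.min?, List.foldl_map, pvRunMin]
      have hfold1 : (h :: t).foldl (fun best x => if x.length < best.length then x else best) h
          = t.foldl (fun best x => if x.length < best.length then x else best) h := by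
        simp
      rw [min_len_item_py, min_len_item_py_alt, hmin, hfold1, pv_fold_eq_find t h,
          if_neg (List.cons_ne_nil h t)]
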